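-- pv_equiv track=rewrite | github.com/roidaradal/aoc-py | 2018/1821.py | solveR0
-- ===== SOURCE A (Python) =====
-- def solveR0(r3: int, initialR4: int) -> int:
--     r4 = initialR4
--     while True:
--         r4 += r3 & 255
--         r4 &= 16777215
--         r4 *= 65899
--         r4 &= 16777215
--
--         if 256 > r3:
--             break
--         else:
--             r3 //= 256
--     return r4
-- ===== SOURCE B (Python) =====
-- def solveR0(r3: int, initialR4: int) -> int:
--     # Each hash round is the affine map x -> ((x + d) * 65899) mod 2^24.
--     # Compose these maps over the base-256 digits of r3 into one map x -> m*x + a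
--     # (never touching initialR4), then apply the composed map once at the end.
--     MASK = 16777215
--     m, a = 1, 0
--     n = r3
--     while True:
--         a = ((a + (n & 255)) * 65899) & MASK
--         m = (m * 65899) & MASK
--         if n < 256:
--             break
--         n >>= 8
--     return (m * initialR4 + a) & MASK
-- ===== Notes on version B (the rewrite author's own statement) =====
-- stated objective: alternative
-- what changed: Each hash round is an affine map mod 2^24; B composes these maps over r3's base-256 digits into a single pair (m, a) without ever touching initialR4, then returns (m*initialR4 + a) & mask once, instead of A's do-while that threads r4 through every round.
import Mathlib
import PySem

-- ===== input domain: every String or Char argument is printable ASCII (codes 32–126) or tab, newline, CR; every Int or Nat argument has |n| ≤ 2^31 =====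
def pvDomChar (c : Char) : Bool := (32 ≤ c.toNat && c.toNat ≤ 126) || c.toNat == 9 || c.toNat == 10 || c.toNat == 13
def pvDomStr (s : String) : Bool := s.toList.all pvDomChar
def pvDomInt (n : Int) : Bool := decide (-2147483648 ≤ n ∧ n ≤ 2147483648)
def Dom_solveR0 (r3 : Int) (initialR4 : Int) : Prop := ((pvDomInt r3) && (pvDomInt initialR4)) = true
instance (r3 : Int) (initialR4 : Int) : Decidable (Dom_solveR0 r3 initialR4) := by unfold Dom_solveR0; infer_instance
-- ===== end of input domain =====

-- B replaces A's do-while that threads r4 through every round by composing the per-digit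
-- affine maps mod 2^24 into one pair (m, a) and applying it to initialR4 once (objective: alternative).

-- ===== PORT A =====
-- In Python, x & 255 = x % 256 and x & 16777215 = x % 16777216 (mask = 2^k - 1),
-- so the bitwise ANDs are ported exactly as PySem.Int.mod with a power-of-two modulus.
def solveR0 (r3 : Int) (initialR4 : Int) : Int :=
  let r4 := initialR4 + PySem.Int.mod r3 256
  let r4 := PySem.Int.mod r4 16777216
  let r4 := r4 * 65899
  let r4 := PySem.Int.mod r4 16777216
  if 256 > r3 then r4
  else solveR0 (PySem.Int.floordiv r3 256) r4
termination_by r3.toNat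
decreasing_by
  rw [PySem.Int.floordiv_eq_ediv_of_pos (by norm_num)]
  omega

-- ===== PORT B =====
-- Python's n >> 8 on int is floor division by 256: PySem.Int.floordiv n 256.
-- B's while-loop over (n, m, a); initialR4 is not involved until the final application.
def pvCompose (n m a : Int) : Int × Int :=
  let a' := PySem.Int.mod ((a + PySem.Int.mod n 256) * 65899) 16777216
  let m' := PySem.Int.mod (m * 65899) 16777216
  if n < 256 then (m', a') else pvCompose (PySem.Int.floordiv n 256) m' a'
termination_by n.toNat
decreasing_by
  rw [PySem.Int.floordiv_eq_ediv_of_pos (by norm_num)]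
  omega

def solveR0_alt (r3 : Int) (initialR4 : Int) : Int :=
  let ma := pvCompose r3 1 0
  PySem.Int.mod (ma.1 * initialR4 + ma.2) 16777216

-- ===== PRECONDITION & SPEC =====
def Spec_solveR0 (r3 : Int) (initialR4 : Int) (out : Int) : Prop := out = solveR0_alt r3 initialR4
instance (r3 : Int) (initialR4 : Int) (out : Int) : Decidable (Spec_solveR0 r3 initialR4 out) := by unfold Spec_solveR0; infer_instance

-- ===== CLAIM (what is proved, stated in full; the proofs are below) =====
def Claim_equal_solveR0 : Prop := ∀ (r3 : Int) (initialR4 : Int), Dom_solveR0 r3 initialR4 → Spec_solveR0 r3 initialR4 (solveR0 r3 initialR4)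

-- ===== LEMMAS AND PROOFS =====
-- Core modular identity: the composed affine coefficients applied to x agree (mod 2^24)
-- with one hash round starting from m*x + a.
theorem hash_compose (m a d x : Int) :
    (m * 65899 % 16777216 * x + (a + d) * 65899 % 16777216) % 16777216
      = ((m * x + a + d) % 16777216 * 65899) % 16777216 := by
  have e1 : Int.ModEq 16777216 (m * 65899 % 16777216) (m * 65899) :=
    Int.emod_emod_of_dvd _ dvd_rfl
  have e2 : Int.ModEq 16777216 ((a + d) * 65899 % 16777216) ((a + d) * 65899) :=
    Int.emod_emod_of_dvd _ dvd_rfl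
  have e3 : Int.ModEq 16777216 ((m * x + a + d) % 16777216) (m * x + a + d) :=
    Int.emod_emod_of_dvd _ dvd_rfl
  have h1 : (m * 65899 % 16777216 * x + (a + d) * 65899 % 16777216) % 16777216
      = (m * 65899 * x + (a + d) * 65899) % 16777216 := (e1.mul_right x).add e2
  have h2 : ((m * x + a + d) % 16777216 * 65899) % 16777216
      = ((m * x + a + d) * 65899) % 16777216 := e3.mul_right 65899
  rw [h1, h2]; ring_nf

-- A's result depends on its second argument only modulo 2^24.
theorem solveR0_congr (n y y' : Int) (h : y % 16777216 = y' % 16777216) :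
    solveR0 n y = solveR0 n y' := by
  conv_lhs => rw [solveR0]
  conv_rhs => rw [solveR0]
  have hm : PySem.Int.mod (y + PySem.Int.mod n 256) 16777216
       = PySem.Int.mod (y' + PySem.Int.mod n 256) 16777216 := by
    simp only [PySem.Int.mod_eq_emod_of_pos (show (0:Int) < 16777216 by norm_num)]
    rw [Int.add_emod, h, ← Int.add_emod]
  rw [hm]

-- Key invariant: applying the composed map to x equals running A from m*x + a.
theorem pvCompose_eval (n m a : Int) : ∀ x : Int,
    PySem.Int.mod ((pvCompose n m a).1 * x + (pvCompose n m a).2) 16777216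
      = solveR0 n (m * x + a) := by
  fun_induction pvCompose n m a
  case case1 n m a a' m' h =>
    intro x
    rw [solveR0, if_pos h]
    simp only [a', m', PySem.Int.mod_eq_emod_of_pos (show (0:Int) < 16777216 by norm_num)]
    exact hash_compose m a (PySem.Int.mod n 256) x
  case case2 n m a a' m' h ih =>
    intro x
    rw [ih x]
    conv_rhs => rw [solveR0, if_neg h]
    apply solveR0_congr
    simp only [a', m', PySem.Int.mod_eq_emod_of_pos (show (0:Int) < 16777216 by norm_num)]
    rw [Int.emod_emod_of_dvd _ dvd_rfl]
    exact hash_compose m a (PySem.Int.mod n 256) x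

-- ===== VERDICT (by name: the statement is the Claim_ definition above) =====
theorem solveR0_spec : Claim_equal_solveR0 := by
  intro r3 r4 _
  unfold Spec_solveR0 solveR0_alt
  have h := pvCompose_eval r3 1 0 r4
  simp only [one_mul, add_zero] at h
  exact h.symm
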